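-- pv_equiv track=rewrite | github.com/lavernac/3d_graphs_for_serj | graph.py | rebuild_lists
-- ===== SOURCE A (Python) =====
-- def append_new_list(x, y, z, x_temp, y_temp, z_temp, dimention):
--     x_temp.append([])
--     x_temp[dimention].append(x)
--     y_temp.append([])
--     y_temp[dimention].append(y)
--     z_temp.append([])
--     z_temp[dimention].append(z)
--
-- def rebuild_lists(x, y, z):
--     x_temp = []
--     y_temp = []
--     z_temp = []
--     dimention = 0
--     for i in range(0, len(x)):
--         if len(x_temp) == 0:
--             append_new_list(x[0], y[0], z[0], x_temp, y_temp, z_temp, 0)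
--         elif x[i-1] != x[i]:
--             dimention += 1
--             append_new_list(x[i], y[i], z[i], x_temp, y_temp, z_temp, dimention)
--         elif x[i-1] == x[i]:
--             x_temp[dimention].append(x[i])
--             y_temp[dimention].append(y[i])
--             z_temp[dimention].append(z[i])
--     return x_temp, y_temp, z_temp
-- ===== SOURCE B (Python) =====
-- def rebuild_lists(x, y, z):
--     bounds = []
--     start = 0
--     for i in range(1, len(x)):
--         if x[i] != x[i - 1]:
--             bounds.append((start, i))
--             start = i
--     if x:
--         bounds.append((start, len(x)))
--     return ([x[a:b] for a, b in bounds],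
--             [y[a:b] for a, b in bounds],
--             [z[a:b] for a, b in bounds])
-- ===== Notes on version B (the rewrite author's own statement) =====
-- stated objective: simpler
-- what changed: B computes only the run boundaries of consecutive equal x-values in one pass, then builds all three outputs as slices of x/y/z; A's element-by-element branch cascade with a manual dimention counter and in-place group mutation disappears.
import Mathlib
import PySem

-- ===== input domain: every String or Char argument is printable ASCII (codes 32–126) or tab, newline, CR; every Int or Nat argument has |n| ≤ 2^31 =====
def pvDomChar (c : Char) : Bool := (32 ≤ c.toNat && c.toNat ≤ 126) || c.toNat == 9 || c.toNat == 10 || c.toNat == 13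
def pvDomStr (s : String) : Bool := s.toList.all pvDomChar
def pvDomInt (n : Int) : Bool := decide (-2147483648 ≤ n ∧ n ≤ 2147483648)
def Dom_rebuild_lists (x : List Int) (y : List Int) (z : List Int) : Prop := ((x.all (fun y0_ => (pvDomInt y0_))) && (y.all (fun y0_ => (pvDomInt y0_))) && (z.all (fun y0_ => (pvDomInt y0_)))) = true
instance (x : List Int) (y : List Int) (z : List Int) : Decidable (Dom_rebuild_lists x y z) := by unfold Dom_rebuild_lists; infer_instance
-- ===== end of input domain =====

-- B replaces A's element-by-element branch cascade (manual dimention counter, in-place group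
-- mutation) by one pass collecting run boundaries followed by slicing x/y/z; same O(n) cost, simpler.

-- ===== PORT A =====
-- append_new_list: append [] to each temp list, then append the value into index `dimention`
def pvAppendNewList (vx vy vz : Int)
    (xt yt zt : List (List Int)) (dim : Nat) :
    List (List Int) × List (List Int) × List (List Int) :=
  ((xt ++ [[]]).modify dim (· ++ [vx]),
   (yt ++ [[]]).modify dim (· ++ [vy]),
   (zt ++ [[]]).modify dim (· ++ [vz]))

-- loop body of A, state = (x_temp, y_temp, z_temp, dimention)
def pvStepA (x y z : List Int)
    (st : List (List Int) × List (List Int) × List (List Int) × Nat) (i : Int) :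
    List (List Int) × List (List Int) × List (List Int) × Nat :=
  let xt := st.1; let yt := st.2.1; let zt := st.2.2.1; let dim := st.2.2.2
  if xt.length = 0 then
    let r := pvAppendNewList (PySem.List.pyGetD x 0 0) (PySem.List.pyGetD y 0 0)
      (PySem.List.pyGetD z 0 0) xt yt zt 0
    (r.1, r.2.1, r.2.2, dim)
  else if PySem.List.pyGetD x (i-1) 0 ≠ PySem.List.pyGetD x i 0 then
    let dim' := dim + 1
    let r := pvAppendNewList (PySem.List.pyGetD x i 0) (PySem.List.pyGetD y i 0)
      (PySem.List.pyGetD z i 0) xt yt zt dim'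
    (r.1, r.2.1, r.2.2, dim')
  else if PySem.List.pyGetD x (i-1) 0 = PySem.List.pyGetD x i 0 then
    (xt.modify dim (· ++ [PySem.List.pyGetD x i 0]),
     yt.modify dim (· ++ [PySem.List.pyGetD y i 0]),
     zt.modify dim (· ++ [PySem.List.pyGetD z i 0]), dim)
  else st

def rebuild_lists (x : List Int) (y : List Int) (z : List Int) :
    List (List Int) × List (List Int) × List (List Int) :=
  let st := (PySem.List.pyRange 0 (x.length : Int) 1).foldl (pvStepA x y z) ([], [], [], 0)
  (st.1, st.2.1, st.2.2.1)

-- ===== PORT B =====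
-- loop body of B, state = (bounds, start)
def pvStepB (x : List Int) (st : List (Int × Int) × Int) (i : Int) :
    List (Int × Int) × Int :=
  if PySem.List.pyGetD x i 0 ≠ PySem.List.pyGetD x (i-1) 0 then
    (st.1 ++ [(st.2, i)], i)
  else st

def rebuild_lists_alt (x : List Int) (y : List Int) (z : List Int) :
    List (List Int) × List (List Int) × List (List Int) :=
  let n : Int := x.length
  let st := (PySem.List.pyRange 1 n 1).foldl (pvStepB x) ([], 0)
  let bounds := if x ≠ [] then st.1 ++ [(st.2, n)] else st.1
  (bounds.map (fun p => PySem.List.slice x (some p.1) (some p.2)),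
   bounds.map (fun p => PySem.List.slice y (some p.1) (some p.2)),
   bounds.map (fun p => PySem.List.slice z (some p.1) (some p.2)))

-- ===== PRECONDITION & SPEC =====
-- Pre_ excludes exactly the inputs where A raises IndexError (y or z shorter than x).
def Pre_rebuild_lists (x : List Int) (y : List Int) (z : List Int) : Prop :=
  x.length ≤ y.length ∧ x.length ≤ z.length
instance (x : List Int) (y : List Int) (z : List Int) : Decidable (Pre_rebuild_lists x y z) := by
  unfold Pre_rebuild_lists; infer_instance
def pvWitness_rebuild_lists : List Int × List Int × List Int :=
  ([1, 1, 2, 2, 3], [4, 5, 6, 7, 8], [9, 8, 7, 6, 5])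

def Spec_rebuild_lists (x : List Int) (y : List Int) (z : List Int)
    (out : List (List Int) × List (List Int) × List (List Int)) : Prop :=
  out = rebuild_lists_alt x y z
instance (x : List Int) (y : List Int) (z : List Int)
    (out : List (List Int) × List (List Int) × List (List Int)) :
    Decidable (Spec_rebuild_lists x y z out) := by unfold Spec_rebuild_lists; infer_instance

-- ===== CLAIM (what is proved, stated in full; the proofs are below) =====
def Claim_equal_rebuild_lists : Prop := ∀ (x : List Int) (y : List Int) (z : List Int),
  Dom_rebuild_lists x y z → Pre_rebuild_lists x y z →
  Spec_rebuild_lists x y z (rebuild_lists x y z)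


-- ===== LEMMAS AND PROOFS =====

-- slices of l described by a list of (start, stop) bounds
def pvG (l : List Int) (bs : List (Int × Int)) : List (List Int) :=
  bs.map (fun p => PySem.List.slice l (some p.1) (some p.2))

def pvFoldA (x y z : List Int) (k : Nat) :
    List (List Int) × List (List Int) × List (List Int) × Nat :=
  (PySem.List.pyRange 0 (k : Int) 1).foldl (pvStepA x y z) ([], [], [], 0)

def pvFoldB (x : List Int) (k : Nat) : List (Int × Int) × Int :=
  (PySem.List.pyRange 1 (k : Int) 1).foldl (pvStepB x) ([], 0)

theorem pvModify_append_singleton {α : Type} (L : List α) (a : α) (f : α → α) :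
    (L ++ [a]).modify L.length f = L ++ [f a] := by
  induction L with
  | nil => rfl
  | cons h t ih =>
    simp only [List.cons_append, List.length_cons, List.modify]
    simpa [List.modify] using ih

theorem pvSlice_singleton (l : List Int) (k : Nat) (hk : k < l.length) :
    PySem.List.slice l (some (k : Int)) (some ((k : Int) + 1)) = [l[k]] := by
  have h1 : ((k : Int) + 1) = ((k + 1 : Nat) : Int) := by push_cast; ring
  rw [h1, PySem.List.slice_natCast]
  have h2 : k + 1 - k = 1 := by omega
  rw [h2, List.take_one_drop_eq_of_lt_length hk]
  simp

theorem pvSlice_snoc (l : List Int) (s k : Nat) (hs : s ≤ k) (hk : k < l.length) :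
    PySem.List.slice l (some (s : Int)) (some ((k : Int) + 1)) =
      PySem.List.slice l (some (s : Int)) (some (k : Int)) ++ [l[k]] := by
  have h1 : ((k : Int) + 1) = ((k + 1 : Nat) : Int) := by push_cast; ring
  rw [h1, PySem.List.slice_natCast, PySem.List.slice_natCast]
  have h2 : k + 1 - s = (k - s) + 1 := by omega
  rw [h2, List.take_add_one]
  have h3 : k - s < (l.drop s).length := by simp; omega
  have h4 : (l.drop s)[k - s] = l[k] := by
    rw [List.getElem_drop]; congr 1; omega
  simp [List.getElem?_eq_getElem h3, h4]

-- the invariant relating A's fold state to B's fold state after k steps of the loops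
theorem pvInvariant (x y z : List Int) (hy : x.length ≤ y.length) (hz : x.length ≤ z.length)
    (k : Nat) (hk1 : 1 ≤ k) (hkn : k ≤ x.length) :
    (pvFoldB x k).2.toNat < k ∧ 0 ≤ (pvFoldB x k).2 ∧
    pvFoldA x y z k =
      (pvG x ((pvFoldB x k).1 ++ [((pvFoldB x k).2, (k : Int))]),
       pvG y ((pvFoldB x k).1 ++ [((pvFoldB x k).2, (k : Int))]),
       pvG z ((pvFoldB x k).1 ++ [((pvFoldB x k).2, (k : Int))]),
       (pvFoldB x k).1.length) := by
  induction k with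
  | zero => omega
  | succ k ih =>
    by_cases hk0 : k = 0
    · -- base case k + 1 = 1
      subst hk0
      have hx0 : 0 < x.length := by omega
      have hy0 : 0 < y.length := by omega
      have hz0 : 0 < z.length := by omega
      have hB : pvFoldB x 1 = ([], 0) := by
        simp [pvFoldB, PySem.List.pyRange_one_eq_nil]
      have hA : pvFoldA x y z 1 = pvStepA x y z ([], [], [], 0) 0 := by
        unfold pvFoldA
        rw [show ((1 : Nat) : Int) = (0 : Int) + 1 by norm_num,
          PySem.List.pyRange_one_singleton]
        rfl
      refine ⟨by simp [hB], by simp [hB], ?_⟩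
      rw [hA, hB]
      simp only [pvStepA, pvAppendNewList, pvG]
      simp only [List.length_nil, if_true]
      have e1 : PySem.List.slice x (some (0 : Int)) (some (1 : Int)) = [x[0]] := by
        have := pvSlice_singleton x 0 hx0; simpa using this
      have e2 : PySem.List.slice y (some (0 : Int)) (some (1 : Int)) = [y[0]] := by
        have := pvSlice_singleton y 0 hy0; simpa using this
      have e3 : PySem.List.slice z (some (0 : Int)) (some (1 : Int)) = [z[0]] := by
        have := pvSlice_singleton z 0 hz0; simpa using this
      simp [List.modify, e1, e2, e3, PySem.List.pyGetD_zero,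
        List.getElem?_eq_getElem hx0, List.getElem?_eq_getElem hy0, List.getElem?_eq_getElem hz0]
    · -- inductive step: 1 ≤ k < k + 1 ≤ n
      have hk : 1 ≤ k := by omega
      have hklt : k < x.length := by omega
      have hky : k < y.length := by omega
      have hkz : k < z.length := by omega
      obtain ⟨ihs, ihnn, ihEq⟩ := ih hk (by omega)
      obtain ⟨sN, hsN⟩ : ∃ m : Nat, (pvFoldB x k).2 = (m : Int) :=
        ⟨(pvFoldB x k).2.toNat, by omega⟩
      have hsNk : sN < k := by omega
      set bs := (pvFoldB x k).1 with hbs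
      rw [hsN] at ihEq
      have hA : pvFoldA x y z (k+1) = pvStepA x y z (pvFoldA x y z k) (k : Int) := by
        unfold pvFoldA
        rw [show ((k+1 : Nat) : Int) = (k : Int) + 1 by push_cast; ring,
          PySem.List.pyRange_one_succ_right (by positivity), List.foldl_append]
        rfl
      have hB : pvFoldB x (k+1) = pvStepB x (pvFoldB x k) (k : Int) := by
        unfold pvFoldB
        rw [show ((k+1 : Nat) : Int) = (k : Int) + 1 by push_cast; ring,
          PySem.List.pyRange_one_succ_right (by exact_mod_cast hk), List.foldl_append]
        rfl
      have hgx : PySem.List.pyGetD x (k : Int) 0 = x[k] := by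
        simp [List.getElem?_eq_getElem hklt]
      have hgy : PySem.List.pyGetD y (k : Int) 0 = y[k] := by
        simp [List.getElem?_eq_getElem hky]
      have hgz : PySem.List.pyGetD z (k : Int) 0 = z[k] := by
        simp [List.getElem?_eq_getElem hkz]
      have hcast : ((k + 1 : Nat) : Int) = (k : Int) + 1 := by push_cast; ring
      by_cases hne : PySem.List.pyGetD x ((k : Int) - 1) 0 ≠ PySem.List.pyGetD x (k : Int) 0
      · -- new group starts at k
        have hBstep : pvFoldB x (k+1) = (bs ++ [(((sN : Nat) : Int), (k : Int))], (k : Int)) := by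
          rw [hB]; simp only [pvStepB]
          rw [if_pos (by simpa [ne_comm] using hne), ← hbs, hsN]
        have hmod : ∀ (l : List Int), k < l.length →
            (pvG l (bs ++ [(((sN : Nat) : Int), (k : Int))]) ++ [[]]).modify (bs.length + 1)
              (· ++ [PySem.List.pyGetD l (k : Int) 0]) =
            pvG l ((bs ++ [(((sN : Nat) : Int), (k : Int))]) ++ [((k : Int), (k : Int) + 1)]) := by
          intro l hkl
          have hg : PySem.List.pyGetD l (k : Int) 0 = l[k] := by
            simp [List.getElem?_eq_getElem hkl]
          have hlen : (pvG l (bs ++ [(((sN : Nat) : Int), (k : Int))])).length = bs.length + 1 := by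
            simp [pvG]
          have hm := pvModify_append_singleton (pvG l (bs ++ [(((sN : Nat) : Int), (k : Int))]))
            ([] : List Int) (· ++ [PySem.List.pyGetD l (k : Int) 0])
          rw [hlen] at hm
          rw [hm, hg]
          simp [pvG, pvSlice_singleton l k hkl]
        rw [hA, hBstep, ihEq]
        simp only [pvStepA, pvAppendNewList]
        rw [if_neg (by simp [pvG]), if_pos hne]
        refine ⟨by simp, by positivity, ?_⟩
        simp only [Prod.mk.injEq]
        refine ⟨?_, ?_, ?_, ?_⟩
        · rw [hcast]; exact hmod x hklt
        · rw [hcast]; exact hmod y hky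
        · rw [hcast]; exact hmod z hkz
        · simp
      · -- same value as previous: extend the last group
        rw [not_not] at hne
        have hBstep : pvFoldB x (k+1) = (bs, ((sN : Nat) : Int)) := by
          rw [hB]; simp only [pvStepB]
          rw [if_neg (by simp [hne]), ← hsN]
        have hmod2 : ∀ (l : List Int), k < l.length →
            (pvG l (bs ++ [(((sN : Nat) : Int), (k : Int))])).modify bs.length
              (· ++ [PySem.List.pyGetD l (k : Int) 0]) =
            pvG l (bs ++ [(((sN : Nat) : Int), (k : Int) + 1)]) := by
          intro l hkl
          have hg : PySem.List.pyGetD l (k : Int) 0 = l[k] := by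
            simp [List.getElem?_eq_getElem hkl]
          have hsplit : pvG l (bs ++ [(((sN : Nat) : Int), (k : Int))]) =
              pvG l bs ++ [PySem.List.slice l (some ((sN : Nat) : Int)) (some (k : Int))] := by
            simp [pvG]
          have hlen : (pvG l bs).length = bs.length := by simp [pvG]
          rw [hsplit, ← hlen, pvModify_append_singleton, hg,
            ← pvSlice_snoc l sN k (by omega) hkl]
          simp [pvG]
        rw [hA, hBstep, ihEq]
        simp only [pvStepA]
        rw [if_neg (by simp [pvG]), if_neg (by simpa using hne), if_pos hne]
        refine ⟨by simpa using hsNk.trans (Nat.lt_succ_self k) , by positivity, ?_⟩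
        simp only [Prod.mk.injEq]
        exact ⟨by rw [hcast]; exact hmod2 x hklt, by rw [hcast]; exact hmod2 y hky,
          by rw [hcast]; exact hmod2 z hkz, trivial⟩

theorem pvRebuild_eq_fold (x y z : List Int) :
    rebuild_lists x y z =
      ((pvFoldA x y z x.length).1, (pvFoldA x y z x.length).2.1,
       (pvFoldA x y z x.length).2.2.1) := rfl

theorem pvAlt_eq_fold (x y z : List Int) (hx : x ≠ []) :
    rebuild_lists_alt x y z =
      (pvG x ((pvFoldB x x.length).1 ++ [((pvFoldB x x.length).2, (x.length : Int))]),
       pvG y ((pvFoldB x x.length).1 ++ [((pvFoldB x x.length).2, (x.length : Int))]),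
       pvG z ((pvFoldB x x.length).1 ++ [((pvFoldB x x.length).2, (x.length : Int))])) := by
  simp only [rebuild_lists_alt, pvG, pvFoldB, if_pos hx]

-- ===== VERDICT (by name: the statement is the Claim_ definition above) =====
theorem rebuild_lists_spec : Claim_equal_rebuild_lists := by
  intro x y z _ hpre
  obtain ⟨hy, hz⟩ := hpre
  unfold Spec_rebuild_lists
  by_cases hx : x = []
  · subst hx; rfl
  · have hn : 1 ≤ x.length := by
      have := List.length_pos_iff.mpr hx; omega
    obtain ⟨_, _, hEq⟩ := pvInvariant x y z hy hz x.length hn le_rfl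
    rw [pvRebuild_eq_fold, pvAlt_eq_fold x y z hx, hEq]
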